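-- pv_equiv track=rewrite | github.com/NousResearch/hermes-agent | skills/productivity/telegram-location/scripts/nearby_places.py | _expand_days
-- ===== SOURCE A (Python) =====
-- from typing import Any, Dict, List, Optional, Sequence, Tuple
--
-- _DAY_TO_IDX = {"Mo": 0, "Tu": 1, "We": 2, "Th": 3, "Fr": 4, "Sa": 5, "Su": 6}
--
-- def _expand_days(expr: str) -> Optional[List[int]]:
--     expr = expr.strip()
--     if not expr:
--         return None
--     if "PH" in expr or "SH" in expr:
--         return None
--
--     days: set[int] = set()
--     for chunk in expr.split(","):
--         chunk = chunk.strip()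
--         if not chunk:
--             continue
--         if "-" in chunk:
--             start, end = [p.strip() for p in chunk.split("-", 1)]
--             if start not in _DAY_TO_IDX or end not in _DAY_TO_IDX:
--                 return None
--             sidx = _DAY_TO_IDX[start]
--             eidx = _DAY_TO_IDX[end]
--             if sidx <= eidx:
--                 for i in range(sidx, eidx + 1):
--                     days.add(i)
--             else:
--                 # Wrap-around (e.g., Fr-Mo)
--                 for i in range(sidx, 7):
--                     days.add(i)
--                 for i in range(0, eidx + 1):
--                     days.add(i)
--         else:
--             if chunk not in _DAY_TO_IDX:
--                 return None
--             days.add(_DAY_TO_IDX[chunk])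
--
--     return sorted(days)
-- ===== SOURCE B (Python) =====
-- _DAY_TO_IDX = {"Mo": 0, "Tu": 1, "We": 2, "Th": 3, "Fr": 4, "Sa": 5, "Su": 6}
--
-- def _chunk_mask(chunk):
--     # 7-bit mask of the days this chunk names; 0 for an empty chunk, None on error
--     if not chunk:
--         return 0
--     if "-" in chunk:
--         a, b = chunk.split("-", 1)
--         s = _DAY_TO_IDX.get(a.strip())
--         e = _DAY_TO_IDX.get(b.strip())
--         if s is None or e is None:
--             return None
--         span = (1 << ((e - s) % 7 + 1)) - 1          # (e-s)%7+1 consecutive bits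
--         return (span << s) & 127 | span >> (7 - s)   # rotated left by s within 7 bits
--     d = _DAY_TO_IDX.get(chunk)
--     return None if d is None else 1 << d
--
-- def _expand_days(expr):
--     expr = expr.strip()
--     if not expr or "PH" in expr or "SH" in expr:
--         return None
--     mask = 0
--     for chunk in expr.split(","):
--         m = _chunk_mask(chunk.strip())
--         if m is None:
--             return None
--         mask |= m
--     return [d for d in range(7) if mask >> d & 1]
-- ===== Notes on version B (the rewrite author's own statement) =====
-- stated objective: alternative
-- what changed: Replaces the mutable day set with its per-range expansion loops and final sort by a 7-bit bitmask: each chunk becomes a closed-form rotated bit span ((1<<((e-s)%7+1))-1 rotated by s), chunk masks are OR-ed, and the sorted output is one bit-test scan of days 0..6.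
import Mathlib
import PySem

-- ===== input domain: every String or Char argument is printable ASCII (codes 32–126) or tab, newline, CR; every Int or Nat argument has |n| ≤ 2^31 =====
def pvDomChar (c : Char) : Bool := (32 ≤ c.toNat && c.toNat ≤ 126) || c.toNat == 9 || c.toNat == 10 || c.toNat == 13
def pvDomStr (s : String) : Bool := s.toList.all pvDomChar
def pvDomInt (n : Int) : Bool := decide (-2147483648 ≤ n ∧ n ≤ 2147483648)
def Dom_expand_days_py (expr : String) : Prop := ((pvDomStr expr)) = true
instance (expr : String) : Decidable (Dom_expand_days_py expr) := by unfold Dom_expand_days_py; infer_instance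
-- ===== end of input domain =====

set_option maxHeartbeats 2000000


-- B replaces A's mutable day set (two directional expansion loops per range, final sort)
-- by a 7-bit bitmask: each chunk becomes a closed-form rotated span of bits, chunk masks
-- are OR-ed together, and the sorted output falls out of one bit-test scan of 0..6
-- (objective: alternative algorithm/data structure).

-- ===== PORT A =====
def pvDayToIdx : PySem.Dict String Int :=
  PySem.Dict.ofList [("Mo",0),("Tu",1),("We",2),("Th",3),("Fr",4),("Sa",5),("Su",6)]

-- one iteration of A's `for chunk in expr.split(",")` loop; `none` = the function returned None
def pvStepA (acc : Option (PySem.Set Int)) (chunk0 : String) : Option (PySem.Set Int) :=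
  match acc with
  | none => none
  | some days =>
    let chunk := PySem.Str.strip chunk0
    if chunk = "" then some days
    else if PySem.Str.isIn "-" chunk then
      match PySem.Str.splitMax? chunk "-" 1 with
      | some (s0 :: e0 :: _) =>
        match pvDayToIdx.get? (PySem.Str.strip s0), pvDayToIdx.get? (PySem.Str.strip e0) with
        | some sidx, some eidx =>
          if sidx ≤ eidx then
            some (PySem.Set.update days (PySem.List.pyRange sidx (eidx + 1)))
          else
            some (PySem.Set.update (PySem.Set.update days (PySem.List.pyRange sidx 7))
                    (PySem.List.pyRange 0 (eidx + 1)))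
        | _, _ => none
      | _ => none  -- unreachable: "-" occurs in chunk, so the split has two parts
    else
      match pvDayToIdx.get? chunk with
      | none => none
      | some d => some (PySem.Set.add days d)

def expand_days_py (expr : String) : Option (List Int) :=
  let expr := PySem.Str.strip expr
  if expr = "" then none
  else if PySem.Str.isIn "PH" expr || PySem.Str.isIn "SH" expr then none
  else
    match PySem.Str.split? expr "," with
    | none => none  -- unreachable: separator "," is non-empty
    | some chunks =>
      match chunks.foldl pvStepA (some PySem.Set.empty) with
      | none => none
      | some days => some (PySem.List.sorted days (fun x => x))

-- ===== PORT B =====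
-- Source B's _chunk_mask: 7-bit mask of the days a chunk names (0 for empty, none on error);
-- masks are small nonneg ints, so Nat bit operations are exact for Python's <<, >>, &, |
def pvChunkMask (chunk : String) : Option Nat :=
  if chunk = "" then some 0
  else if PySem.Str.isIn "-" chunk then
    match PySem.Str.splitMax? chunk "-" 1 with
    | some (a :: b :: _) =>
      match pvDayToIdx.get? (PySem.Str.strip a), pvDayToIdx.get? (PySem.Str.strip b) with
      | some s, some e =>
        let span := (1 <<< ((PySem.Int.mod (e - s) 7).toNat + 1)) - 1
        some (((span <<< s.toNat) &&& 127) ||| (span >>> (7 - s.toNat)))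
      | _, _ => none
    | _ => none  -- unreachable: "-" occurs in chunk, so the split has two parts
  else (pvDayToIdx.get? chunk).map (fun d => 1 <<< d.toNat)

-- Source B's accumulation loop over the comma chunks
def pvMaskLoop : List String → Nat → Option Nat
  | [], mask => some mask
  | c :: cs, mask =>
    match pvChunkMask (PySem.Str.strip c) with
    | none => none
    | some m => pvMaskLoop cs (mask ||| m)

def expand_days_py_alt (expr : String) : Option (List Int) :=
  let expr := PySem.Str.strip expr
  if expr = "" ∨ PySem.Str.isIn "PH" expr ∨ PySem.Str.isIn "SH" expr then none
  else
    match PySem.Str.split? expr "," with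
    | none => none  -- unreachable: separator "," is non-empty
    | some chunks =>
      match pvMaskLoop chunks 0 with
      | none => none
      | some mask =>
        some ((PySem.List.pyRange 0 7).filter (fun d => ((mask >>> d.toNat) &&& 1) != 0))

-- ===== PRECONDITION & SPEC =====
def Spec_expand_days_py (expr : String) (out : Option (List Int)) : Prop := out = expand_days_py_alt expr
instance (expr : String) (out : Option (List Int)) : Decidable (Spec_expand_days_py expr out) := by unfold Spec_expand_days_py; infer_instance

-- ===== CLAIM (what is proved, stated in full; the proofs are below) =====
def Claim_equal_expand_days_py : Prop := ∀ (expr : String), Dom_expand_days_py expr → Spec_expand_days_py expr (expand_days_py expr)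

-- ===== LEMMAS AND PROOFS =====

-- the invariant linking A's day set to B's bitmask during the chunk loop
def pvInv (days : PySem.Set Int) (mask : Nat) : Prop :=
  days.Nodup ∧ (∀ x ∈ days, 0 ≤ x ∧ x < 7) ∧
  (∀ x : Int, 0 ≤ x → x < 7 → (x ∈ days ↔ (mask >>> x.toNat) &&& 1 ≠ 0))

theorem pv_dict_val {s : String} {v : Int} (h : pvDayToIdx.get? s = some v) : 0 ≤ v ∧ v < 7 := by
  rw [show pvDayToIdx = PySem.Dict.mk [("Mo",0),("Tu",1),("We",2),("Th",3),("Fr",4),("Sa",5),("Su",6)] from rfl] at h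
  simp only [PySem.Dict.get?_mk_cons] at h
  split_ifs at h <;> (try simp [PySem.Dict.get?] at h) <;> omega

theorem pv_mod7_small {x : Int} (h1 : -7 ≤ x) (h2 : x < 7) :
    PySem.Int.mod x 7 = if x < 0 then x + 7 else x := by
  have ha := PySem.Int.mod_nonneg x (b := 7) (by norm_num)
  have hb := PySem.Int.mod_lt x (b := 7) (by norm_num)
  have hc := PySem.Int.floordiv_mul_add_mod x 7
  split <;> omega

theorem pv_bit_iff (k x : Nat) : (k >>> x) &&& 1 ≠ 0 ↔ k.testBit x = true := by
  simp [Nat.testBit, Nat.and_comm]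

-- bit x of the OR of two masks
theorem pv_bit_or (m n x : Nat) :
    ((m ||| n) >>> x) &&& 1 ≠ 0 ↔ ((m >>> x) &&& 1 ≠ 0 ∨ (n >>> x) &&& 1 ≠ 0) := by
  rw [pv_bit_iff, pv_bit_iff, pv_bit_iff, Nat.testBit_or]
  simp

-- bit x of the closed-form rotated-span mask of a range chunk (the 343 cases, by decide)
theorem pv_bits_range : ∀ a < 7, ∀ b < 7, ∀ c < 7,
    ((((((1 <<< ((7 + b - a) % 7 + 1)) - 1) <<< a) &&& 127 |||
       (((1 <<< ((7 + b - a) % 7 + 1)) - 1) >>> (7 - a))) >>> c) &&& 1 ≠ 0 ↔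
      (if a ≤ b then a ≤ c ∧ c ≤ b else a ≤ c ∨ c ≤ b)) := by decide

theorem pv_bits_single : ∀ a < 7, ∀ c < 7, (((1 <<< a) >>> c) &&& 1 ≠ 0 ↔ c = a) := by decide

theorem pv_range_bit {s e x : Int} (hs : 0 ≤ s ∧ s < 7) (he : 0 ≤ e ∧ e < 7) (hx : 0 ≤ x ∧ x < 7) :
    (((((1 <<< ((PySem.Int.mod (e - s) 7).toNat + 1)) - 1) <<< s.toNat) &&& 127 |||
      (((1 <<< ((PySem.Int.mod (e - s) 7).toNat + 1)) - 1) >>> (7 - s.toNat))) >>> x.toNat) &&& 1 ≠ 0 ↔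
    (if s ≤ e then s ≤ x ∧ x < e + 1 else (s ≤ x ∧ x < 7) ∨ (0 ≤ x ∧ x < e + 1)) := by
  have hm : (PySem.Int.mod (e - s) 7).toNat = (7 + e.toNat - s.toNat) % 7 := by
    rw [pv_mod7_small (by omega) (by omega)]
    split <;> omega
  rw [hm, pv_bits_range s.toNat (by omega) e.toNat (by omega) x.toNat (by omega)]
  split_ifs <;> omega

theorem pv_single_bit {d x : Int} (hd : 0 ≤ d ∧ d < 7) (hx : 0 ≤ x ∧ x < 7) :
    (((1 <<< d.toNat) >>> x.toNat) &&& 1 ≠ 0) ↔ x = d := by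
  rw [pv_bits_single d.toNat (by omega) x.toNat (by omega)]
  omega

theorem pv_step_rel (c : String) {days : PySem.Set Int} {mask : Nat}
    (h : pvInv days mask) :
    (pvStepA (some days) c = none ∧ pvChunkMask (PySem.Str.strip c) = none) ∨
    (∃ d m, pvStepA (some days) c = some d ∧ pvChunkMask (PySem.Str.strip c) = some m ∧
      pvInv d (mask ||| m)) := by
  obtain ⟨hnd, hbd, hmem⟩ := h
  by_cases h1 : PySem.Str.strip c = ""
  · refine Or.inr ⟨days, 0, by simp [pvStepA, h1], by simp [pvChunkMask, h1], hnd, hbd, ?_⟩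
    simpa using hmem
  by_cases h2 : PySem.Str.isIn "-" (PySem.Str.strip c) = true
  all_goals rw [show PySem.Str.isIn "-" (PySem.Str.strip c) = PySem.Chars.isIn ['-'] (PySem.Chars.strip c.toList) from by simp] at h2
  all_goals (try rw [Bool.not_eq_true] at h2)
  · cases hsp : PySem.Str.splitMax? (PySem.Str.strip c) "-" 1 with
    | none => exact Or.inl ⟨by simp [pvStepA, h1, h2, hsp], by simp [pvChunkMask, h1, h2, hsp]⟩
    | some l =>
      match l with
      | [] => exact Or.inl ⟨by simp [pvStepA, h1, h2, hsp], by simp [pvChunkMask, h1, h2, hsp]⟩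
      | [s0] => exact Or.inl ⟨by simp [pvStepA, h1, h2, hsp], by simp [pvChunkMask, h1, h2, hsp]⟩
      | s0 :: e0 :: rest =>
        cases hA : pvDayToIdx.get? (PySem.Str.strip s0) with
        | none =>
          exact Or.inl ⟨by simp [pvStepA, h1, h2, hsp, hA], by simp [pvChunkMask, h1, h2, hsp, hA]⟩
        | some sidx =>
          cases hB : pvDayToIdx.get? (PySem.Str.strip e0) with
          | none =>
            exact Or.inl ⟨by simp [pvStepA, h1, h2, hsp, hA, hB],
                          by simp [pvChunkMask, h1, h2, hsp, hA, hB]⟩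
          | some eidx =>
            have hsv := pv_dict_val hA
            have hev := pv_dict_val hB
            have eb : pvChunkMask (PySem.Str.strip c) =
                some ((((1 <<< ((PySem.Int.mod (eidx - sidx) 7).toNat + 1)) - 1) <<< sidx.toNat) &&& 127 |||
                      (((1 <<< ((PySem.Int.mod (eidx - sidx) 7).toNat + 1)) - 1) >>> (7 - sidx.toNat))) := by
              simp [pvChunkMask, h1, h2, hsp, hA, hB]
            right
            by_cases hle : sidx ≤ eidx
            · have ea : pvStepA (some days) c =
                  some (PySem.Set.update days (PySem.List.pyRange sidx (eidx + 1))) := by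
                simp [pvStepA, h1, h2, hsp, hA, hB, hle]
              refine ⟨_, _, ea, eb, PySem.Set.nodup_update days _ hnd, ?_, ?_⟩
              · intro x hx
                rcases (PySem.Set.mem_update days _ x).mp hx with hx | hx
                · exact hbd x hx
                · have := PySem.List.mem_pyRange_one.mp hx; omega
              · intro x hx1 hx2
                rw [PySem.Set.mem_update, hmem x hx1 hx2, PySem.List.mem_pyRange_one,
                    pv_bit_or, pv_range_bit hsv hev ⟨hx1, hx2⟩, if_pos hle]
            · have ea : pvStepA (some days) c =
                  some (PySem.Set.update (PySem.Set.update days (PySem.List.pyRange sidx 7))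
                          (PySem.List.pyRange 0 (eidx + 1))) := by
                simp [pvStepA, h1, h2, hsp, hA, hB, hle]
              refine ⟨_, _, ea, eb,
                PySem.Set.nodup_update _ _ (PySem.Set.nodup_update days _ hnd), ?_, ?_⟩
              · intro x hx
                rcases (PySem.Set.mem_update _ _ x).mp hx with hx | hx
                · rcases (PySem.Set.mem_update days _ x).mp hx with hx | hx
                  · exact hbd x hx
                  · have := PySem.List.mem_pyRange_one.mp hx; omega
                · have := PySem.List.mem_pyRange_one.mp hx; omega
              · intro x hx1 hx2
                rw [PySem.Set.mem_update, PySem.Set.mem_update, hmem x hx1 hx2,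
                    PySem.List.mem_pyRange_one, PySem.List.mem_pyRange_one,
                    pv_bit_or, pv_range_bit hsv hev ⟨hx1, hx2⟩, if_neg hle]
                tauto
  · cases hD : pvDayToIdx.get? (PySem.Str.strip c) with
    | none => exact Or.inl ⟨by simp [pvStepA, h1, h2, hD], by simp [pvChunkMask, h1, h2, hD]⟩
    | some d =>
      have hdv := pv_dict_val hD
      have ea : pvStepA (some days) c = some (PySem.Set.add days d) := by
        simp [pvStepA, h1, h2, hD]
      have eb : pvChunkMask (PySem.Str.strip c) = some (1 <<< d.toNat) := by
        simp [pvChunkMask, h1, h2, hD]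
      right
      refine ⟨_, _, ea, eb, PySem.Set.nodup_add days d hnd, ?_, ?_⟩
      · intro x hx
        rcases (PySem.Set.mem_add days d x).mp hx with hx | hx
        · exact hbd x hx
        · omega
      · intro x hx1 hx2
        rw [PySem.Set.mem_add, hmem x hx1 hx2, pv_bit_or, pv_single_bit hdv ⟨hx1, hx2⟩]

theorem pv_foldA_none (cs : List String) : cs.foldl pvStepA none = none := by
  induction cs with
  | nil => rfl
  | cons c cs ih => exact ih

theorem pv_fold_rel (cs : List String) {days : PySem.Set Int} {mask : Nat}
    (h : pvInv days mask) :
    (cs.foldl pvStepA (some days) = none ∧ pvMaskLoop cs mask = none) ∨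
    (∃ d m, cs.foldl pvStepA (some days) = some d ∧ pvMaskLoop cs mask = some m ∧ pvInv d m) := by
  induction cs generalizing days mask with
  | nil => exact Or.inr ⟨days, mask, rfl, rfl, h⟩
  | cons c cs ih =>
    rcases pv_step_rel c h with ⟨ha, hb⟩ | ⟨d, m, ha, hb, hinv⟩
    · refine Or.inl ⟨?_, ?_⟩
      · rw [List.foldl_cons, ha]
        exact pv_foldA_none cs
      · simp [pvMaskLoop, hb]
    · rw [List.foldl_cons, ha, show pvMaskLoop (c :: cs) mask = pvMaskLoop cs (mask ||| m) from by simp [pvMaskLoop, hb]]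
      exact ih hinv

theorem pv_final {days : PySem.Set Int} {mask : Nat} (h : pvInv days mask) :
    PySem.List.sorted days (fun x => x) =
    (PySem.List.pyRange 0 7).filter (fun d => ((mask >>> d.toNat) &&& 1) != 0) := by
  obtain ⟨hnd, hbd, hmem⟩ := h
  apply PySem.List.sorted_eq_of_perm_of_pairwise_lt
  · apply (List.perm_ext_iff_of_nodup ?_ hnd).mpr
    · intro x
      rw [List.mem_filter, PySem.List.mem_pyRange_one]
      constructor
      · rintro ⟨⟨hx1, hx2⟩, hpred⟩
        exact (hmem x hx1 hx2).mpr (by simpa using hpred)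
      · intro hx
        obtain ⟨hx1, hx2⟩ := hbd x hx
        exact ⟨⟨hx1, hx2⟩, by simpa using (hmem x hx1 hx2).mp hx⟩
    · exact List.Nodup.filter _ (by decide)
  · exact List.Pairwise.filter _ (by decide)

-- ===== VERDICT (by name: the statement is the Claim_ definition above) =====
theorem expand_days_py_spec : Claim_equal_expand_days_py := by
  intro expr _
  unfold Spec_expand_days_py expand_days_py expand_days_py_alt
  simp only
  by_cases h1 : PySem.Str.strip expr = ""
  · rw [if_pos h1, if_pos (Or.inl h1)]
  by_cases hP : PySem.Str.isIn "PH" (PySem.Str.strip expr) = true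
  · have hP' : PySem.Chars.isIn ['P', 'H'] (PySem.Chars.strip expr.toList) = true := by
      simpa using hP
    rw [if_neg h1, if_pos (by simp [hP']), if_pos (Or.inr (Or.inl hP))]
  by_cases hS : PySem.Str.isIn "SH" (PySem.Str.strip expr) = true
  · have hS' : PySem.Chars.isIn ['S', 'H'] (PySem.Chars.strip expr.toList) = true := by
      simpa using hS
    rw [if_neg h1, if_pos (by simp [hS']), if_pos (Or.inr (Or.inr hS))]
  have hP' : PySem.Chars.isIn ['P', 'H'] (PySem.Chars.strip expr.toList) = false := by
    simpa using hP
  have hS' : PySem.Chars.isIn ['S', 'H'] (PySem.Chars.strip expr.toList) = false := by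
    simpa using hS
  rw [if_neg h1, if_neg (by simp [hP', hS']),
      if_neg (by rintro (h | h | h) <;> [exact h1 h; exact hP h; exact hS h])]
  cases hsp : PySem.Str.split? (PySem.Str.strip expr) "," with
  | none => rfl
  | some chunks =>
    have hinv : pvInv PySem.Set.empty 0 := by
      refine ⟨List.nodup_nil, by simp [PySem.Set.empty], ?_⟩
      intro x _ _
      simp [PySem.Set.empty]
    rcases pv_fold_rel chunks hinv with ⟨ha, hb⟩ | ⟨d, m, ha, hb, hdi⟩
    · simp only [ha, hb]
    · simp only [ha, hb, pv_final hdi]
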